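-- pv_equiv track=rewrite | github.com/jaclark5/ArchitectorDataset | categorical_dataset_design/1_generate_dataset/architector_dataset_generate_structures.py | _generate_ligand_combinations
-- ===== SOURCE A (Python) =====
-- import itertools
--
-- def _generate_ligand_combinations(cn, variants, variant_to_components, ox, max_abs_charge):
--     """
--     Generate all valid ligand multisets for a given coordination number.
--
--     Yields tuples of ligand variant keys that satisfy charge constraints.
--
--     Parameters
--     ----------
--     cn : int
--         Coordination number (number of ligands).
--     variants : list of str
--         List of ligand variant identifiers (e.g., 'L1|W').
--     variant_to_components : dict
--         Maps variant keys to their properties including charge.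
--     ox : int
--         Oxidation state of the metal center.
--     max_abs_charge : int or None
--         Maximum absolute charge constraint. If None, no charge filtering.
--
--     Yields
--     ------
--     tuple of str
--         A multiset of ligand variants as a sorted tuple.
--     """
--     if max_abs_charge is not None:
--         min_target = -max_abs_charge - ox
--         max_target = max_abs_charge - ox
--
--         # Pre-fetch charges for variants
--         pool_with_charges = []
--         for v in variants:
--             c = variant_to_components[v].get('chg', 0)
--             pool_with_charges.append((v, c))
--
--         if pool_with_charges:
--             charges = [c for _, c in pool_with_charges]
--             min_pool_chg = min(charges)
--             max_pool_chg = max(charges)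
--         else:
--             min_pool_chg = 0
--             max_pool_chg = 0
--
--         def generate_recursive(start_idx, current_n, current_q):
--             if current_n == 0:
--                 if min_target <= current_q <= max_target:
--                     yield ()
--                 return
--
--             # Pruning
--             if current_q + (current_n * max_pool_chg) < min_target:
--                 return
--             if current_q + (current_n * min_pool_chg) > max_target:
--                 return
--
--             for i in range(start_idx, len(pool_with_charges)):
--                 v, c = pool_with_charges[i]
--                 for tail in generate_recursive(i, current_n - 1, current_q + c):
--                     yield (v,) + tail
--
--         yield from generate_recursive(0, cn, 0)
--     else:
--         yield from itertools.combinations_with_replacement(variants, cn)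
-- ===== SOURCE B (Python) =====
-- import itertools
--
-- def _generate_ligand_combinations(cn, variants, variant_to_components, ox, max_abs_charge):
--     if max_abs_charge is None:
--         yield from itertools.combinations_with_replacement(variants, cn)
--     else:
--         min_target = -max_abs_charge - ox
--         max_target = max_abs_charge - ox
--         for combo in itertools.combinations_with_replacement(variants, cn):
--             total = sum(variant_to_components[v].get('chg', 0) for v in combo)
--             if min_target <= total <= max_target:
--                 yield combo
-- ===== Notes on version B (the rewrite author's own statement) =====
-- stated objective: simpler
-- what changed: Replaces the hand-written pruned recursive DFS over indexed (variant, charge) pairs by a plain generate-then-filter pass: itertools.combinations_with_replacement enumerates all multisets in the same index order and a charge-sum test keeps exactly those in the target window.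
-- outside the precondition, e.g. on _generate_ligand_combinations(-1, [], {}, -198, 32): A returns [], B raises ValueError
import Mathlib
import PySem

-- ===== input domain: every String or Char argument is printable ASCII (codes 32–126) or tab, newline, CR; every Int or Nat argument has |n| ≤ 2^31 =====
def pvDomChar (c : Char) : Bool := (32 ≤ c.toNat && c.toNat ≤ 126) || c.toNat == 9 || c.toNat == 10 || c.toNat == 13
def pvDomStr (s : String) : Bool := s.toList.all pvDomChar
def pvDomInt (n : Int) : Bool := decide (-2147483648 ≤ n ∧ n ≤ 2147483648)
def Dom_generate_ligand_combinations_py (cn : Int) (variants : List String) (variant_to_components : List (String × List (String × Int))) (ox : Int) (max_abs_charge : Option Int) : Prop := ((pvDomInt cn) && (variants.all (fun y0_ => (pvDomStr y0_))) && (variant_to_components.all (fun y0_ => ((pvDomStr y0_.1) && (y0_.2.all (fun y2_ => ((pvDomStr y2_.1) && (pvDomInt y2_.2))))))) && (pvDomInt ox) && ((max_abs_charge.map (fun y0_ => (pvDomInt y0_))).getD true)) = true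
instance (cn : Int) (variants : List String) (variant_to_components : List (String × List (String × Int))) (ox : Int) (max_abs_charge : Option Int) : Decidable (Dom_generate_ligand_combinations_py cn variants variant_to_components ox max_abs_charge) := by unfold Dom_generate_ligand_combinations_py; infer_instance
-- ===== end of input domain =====

-- ===== PORT A =====
-- B replaces A's pruned recursive DFS by generate-then-filter over combinations_with_replacement (simpler, not faster); return-value equivalence only (both Pythons are generators, compared as the list of yielded tuples).

-- itertools.combinations_with_replacement(xs, n) (library call, shared by both ports)
def pyCWR {α : Type} (xs : List α) (n : Nat) : List (List α) :=
  match n, xs with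
  | 0, _ => [[]]
  | _ + 1, [] => []
  | n + 1, x :: rest => ((pyCWR (x :: rest) n).map (x :: ·)) ++ pyCWR rest (n + 1)
  termination_by (n, xs.length)

-- A's inner generator generate_recursive(start_idx, current_n, current_q)
def pvGenRec (pool : List (String × Int)) (minT maxT minP maxP : Int) :
    Nat → Nat → Int → List (List String)
  | 0, _, q => if minT ≤ q ∧ q ≤ maxT then [[]] else []
  | m + 1, start, q =>
    if q + ((m : Int) + 1) * maxP < minT then []
    else if q + ((m : Int) + 1) * minP > maxT then []
    else
      (List.range' start (pool.length - start)).flatMap (fun i =>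
        let vc := pool.getD i ("", 0)
        (pvGenRec pool minT maxT minP maxP m i (q + vc.2)).map (vc.1 :: ·))

def generate_ligand_combinations_py (cn : Int) (variants : List String) (variant_to_components : List (String × List (String × Int))) (ox : Int) (max_abs_charge : Option Int) : List (List String) :=
  match max_abs_charge with
  | some mabs =>
    let minT := -mabs - ox
    let maxT := mabs - ox
    let pool := variants.map (fun v =>
      (v, (PySem.Dict.mk ((PySem.Dict.mk variant_to_components).getD v [])).getD "chg" 0))
    let charges := pool.map (·.2)
    let minP := if pool.isEmpty then 0 else (PySem.List.min? charges (fun x => x)).getD 0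
    let maxP := if pool.isEmpty then 0 else (PySem.List.max? charges (fun x => x)).getD 0
    pvGenRec pool minT maxT minP maxP cn.toNat 0 0
  | none => pyCWR variants cn.toNat

-- ===== PORT B =====
def pvChg (variant_to_components : List (String × List (String × Int))) (v : String) : Int :=
  (PySem.Dict.mk ((PySem.Dict.mk variant_to_components).getD v [])).getD "chg" 0

def generate_ligand_combinations_py_alt (cn : Int) (variants : List String) (variant_to_components : List (String × List (String × Int))) (ox : Int) (max_abs_charge : Option Int) : List (List String) :=
  match max_abs_charge with
  | some mabs =>
    let minT := -mabs - ox
    let maxT := mabs - ox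
    (pyCWR variants cn.toNat).filter (fun combo =>
      let total := (combo.map (pvChg variant_to_components)).sum
      decide (minT ≤ total ∧ total ≤ maxT))
  | none => pyCWR variants cn.toNat

-- ===== PRECONDITION & SPEC =====
-- Pre_ excludes negative cn — there A raises ValueError (unconstrained branch) or, in the
-- constrained branch, either recurses without bound or is pruned into an accidental empty list,
-- while B's combinations_with_replacement raises ValueError — and, in the constrained branch,
-- variants missing from variant_to_components, on which both A and B raise KeyError.
def Pre_generate_ligand_combinations_py (cn : Int) (variants : List String) (variant_to_components : List (String × List (String × Int))) (_ox : Int) (max_abs_charge : Option Int) : Prop :=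
  0 ≤ cn ∧ (max_abs_charge.isSome = true →
    ∀ v ∈ variants, ((PySem.Dict.mk variant_to_components).get? v).isSome = true)
instance (cn : Int) (variants : List String) (variant_to_components : List (String × List (String × Int))) (ox : Int) (max_abs_charge : Option Int) : Decidable (Pre_generate_ligand_combinations_py cn variants variant_to_components ox max_abs_charge) := by unfold Pre_generate_ligand_combinations_py; infer_instance

def pvWitness_generate_ligand_combinations_py : Int × List String × (List (String × List (String × Int))) × Int × Option Int :=
  (2, ["A", "B"], [("A", [("chg", -1)]), ("B", [("chg", 0)])], 2, some 1)

def Spec_generate_ligand_combinations_py (cn : Int) (variants : List String) (variant_to_components : List (String × List (String × Int))) (ox : Int) (max_abs_charge : Option Int) (out : List (List String)) : Prop := out = generate_ligand_combinations_py_alt cn variants variant_to_components ox max_abs_charge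
instance (cn : Int) (variants : List String) (variant_to_components : List (String × List (String × Int))) (ox : Int) (max_abs_charge : Option Int) (out : List (List String)) : Decidable (Spec_generate_ligand_combinations_py cn variants variant_to_components ox max_abs_charge out) := by unfold Spec_generate_ligand_combinations_py; infer_instance


-- ===== CLAIM (what is proved, stated in full; the proofs are below) =====
def Claim_equal_generate_ligand_combinations_py : Prop := ∀ (cn : Int) (variants : List String) (variant_to_components : List (String × List (String × Int))) (ox : Int) (max_abs_charge : Option Int), Dom_generate_ligand_combinations_py cn variants variant_to_components ox max_abs_charge → Pre_generate_ligand_combinations_py cn variants variant_to_components ox max_abs_charge → Spec_generate_ligand_combinations_py cn variants variant_to_components ox max_abs_charge (generate_ligand_combinations_py cn variants variant_to_components ox max_abs_charge)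

-- ===== LEMMAS AND PROOFS =====

-- every element of a combination-with-replacement comes from the source list
theorem pvMem_pyCWR {α : Type} (xs : List α) (n : Nat) (l : List α) (hl : l ∈ pyCWR xs n) :
    l.length = n ∧ ∀ v ∈ l, v ∈ xs := by
  match n, xs with
  | 0, xs =>
    rw [pyCWR] at hl
    simp at hl
    simp [hl]
  | Nat.succ m, [] =>
    rw [pyCWR] at hl
    simp at hl
  | Nat.succ m, x :: rest =>
    rw [pyCWR] at hl
    rcases List.mem_append.mp hl with h | h
    · obtain ⟨t, ht, rfl⟩ := List.mem_map.mp h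
      obtain ⟨hlen, hmem⟩ := pvMem_pyCWR (x :: rest) m t ht
      refine ⟨by simp [hlen], ?_⟩
      intro v hv
      rcases List.mem_cons.mp hv with rfl | hv
      · exact List.mem_cons_self
      · exact hmem v hv
    · obtain ⟨hlen, hmem⟩ := pvMem_pyCWR rest (m + 1) l h
      exact ⟨hlen, fun v hv => List.mem_cons_of_mem x (hmem v hv)⟩
  termination_by (n, xs.length)
  decreasing_by
  · exact Prod.Lex.left _ _ (Nat.lt_succ_self m)
  · exact Prod.Lex.right _ (by simp)

-- charge-sum bounds used to justify A's pruning
theorem pvSum_le (c : String → Int) (P : Int) (l : List String) (h : ∀ v ∈ l, c v ≤ P) :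
    (l.map c).sum ≤ (l.length : Int) * P := by
  induction l with
  | nil => simp
  | cons x t ih =>
    have h1 := h x List.mem_cons_self
    have h2 := ih (fun v hv => h v (List.mem_cons_of_mem x hv))
    simp only [List.map_cons, List.sum_cons, List.length_cons]
    push_cast
    nlinarith

theorem pvLe_sum (c : String → Int) (P : Int) (l : List String) (h : ∀ v ∈ l, P ≤ c v) :
    (l.length : Int) * P ≤ (l.map c).sum := by
  induction l with
  | nil => simp
  | cons x t ih =>
    have h1 := h x List.mem_cons_self
    have h2 := ih (fun v hv => h v (List.mem_cons_of_mem x hv))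
    simp only [List.map_cons, List.sum_cons, List.length_cons]
    push_cast
    nlinarith

-- the core equivalence: A's pruned DFS from index `start` = filtered CWR of the suffix
theorem pvMain (variants : List String) (c : String → Int) (minT maxT minP maxP : Int)
    (hmin : ∀ v ∈ variants, minP ≤ c v) (hmax : ∀ v ∈ variants, c v ≤ maxP)
    (n start : Nat) (q : Int) :
    pvGenRec (variants.map (fun v => (v, c v))) minT maxT minP maxP n start q
      = (pyCWR (variants.drop start) n).filter
          (fun l => decide (minT ≤ q + (l.map c).sum ∧ q + (l.map c).sum ≤ maxT)) := by
  match n with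
  | 0 =>
    simp only [pvGenRec, pyCWR]
    by_cases h : minT ≤ q ∧ q ≤ maxT <;> simp [h]
  | Nat.succ m =>
    by_cases hs : start < variants.length
    case neg =>
      have hdrop : variants.drop start = [] :=
        List.drop_eq_nil_of_le (Nat.le_of_not_lt hs)
      have hlen : (variants.map (fun v => (v, c v))).length - start = 0 := by
        simp [Nat.sub_eq_zero_of_le (Nat.le_of_not_lt hs)]
      simp only [pvGenRec, hlen, List.range'_zero, List.flatMap_nil, hdrop]
      split_ifs <;> simp [pyCWR]
    case pos =>
      -- facts about the head of the suffix
      have hdrop : variants.drop start = variants[start] :: variants.drop (start + 1) :=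
        List.drop_eq_getElem_cons hs
      by_cases hp1 : q + ((m : Int) + 1) * maxP < minT
      case pos =>
        simp only [pvGenRec]
        rw [if_pos hp1]
        symm
        rw [List.filter_eq_nil_iff]
        intro l hl
        obtain ⟨hlen, hmem⟩ := pvMem_pyCWR _ _ _ hl
        have hb : (l.map c).sum ≤ (l.length : Int) * maxP :=
          pvSum_le c maxP l (fun v hv => hmax v (List.mem_of_mem_drop (hmem v hv)))
        rw [hlen] at hb
        push_cast at hb
        simp only [decide_eq_true_eq, not_and, not_le]
        intro h1
        nlinarith
      case neg =>
      by_cases hp2 : q + ((m : Int) + 1) * minP > maxT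
      case pos =>
        simp only [pvGenRec]
        rw [if_neg hp1, if_pos hp2]
        symm
        rw [List.filter_eq_nil_iff]
        intro l hl
        obtain ⟨hlen, hmem⟩ := pvMem_pyCWR _ _ _ hl
        have hb : (l.length : Int) * minP ≤ (l.map c).sum :=
          pvLe_sum c minP l (fun v hv => hmin v (List.mem_of_mem_drop (hmem v hv)))
        rw [hlen] at hb
        push_cast at hb
        simp only [decide_eq_true_eq, not_and, not_le]
        intro h1
        nlinarith
      case neg =>
        have hslen : start < (variants.map (fun v => (v, c v))).length := by
          simpa using hs
        have hrange : (variants.map (fun v => (v, c v))).length - start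
            = ((variants.map (fun v => (v, c v))).length - (start + 1)) + 1 := by
          omega
        simp only [pvGenRec]
        rw [if_neg hp1, if_neg hp2, hrange, List.range'_succ, List.flatMap_cons]
        -- the head term
        have hget : (variants.map (fun v => (v, c v))).getD start ("", 0)
            = (variants[start], c variants[start]) := by
          rw [List.getD_eq_getElem _ _ hslen]
          simp
        -- the tail of the loop is the (start+1) call with the same (false) guards
        have htail : (List.range' (start + 1)
              ((variants.map (fun v => (v, c v))).length - (start + 1))).flatMap (fun i =>
                let vc := (variants.map (fun v => (v, c v))).getD i ("", 0)
                (pvGenRec (variants.map (fun v => (v, c v))) minT maxT minP maxP m i (q + vc.2)).map (vc.1 :: ·))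
            = pvGenRec (variants.map (fun v => (v, c v))) minT maxT minP maxP (m + 1) (start + 1) q := by
          simp only [pvGenRec]
          rw [if_neg hp1, if_neg hp2]
        rw [htail, hget,
            pvMain variants c minT maxT minP maxP hmin hmax m start (q + c variants[start]),
            pvMain variants c minT maxT minP maxP hmin hmax (m + 1) (start + 1) q]
        -- now both sides are filters of the unfolded CWR
        rw [hdrop, pyCWR, List.filter_append, List.filter_map, ← hdrop]
        congr 1
        congr 1
        congr 1
        funext l
        simp only [Function.comp_apply, List.map_cons, List.sum_cons, ← add_assoc]
  termination_by (n, variants.length - start)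
  decreasing_by
  · exact Prod.Lex.left _ _ (Nat.lt_succ_self m)
  · exact Prod.Lex.right _ (by omega)

-- ===== VERDICT (by name: the statement is the Claim_ definition above) =====
theorem generate_ligand_combinations_py_spec : Claim_equal_generate_ligand_combinations_py := by
  intro cn variants vtc ox mac _hdom _hpre
  unfold Spec_generate_ligand_combinations_py
  cases mac with
  | none => rfl
  | some mabs =>
    have key : ∀ (minP maxP : Int),
        (∀ v ∈ variants, minP ≤ pvChg vtc v) → (∀ v ∈ variants, pvChg vtc v ≤ maxP) →
        pvGenRec (variants.map (fun v => (v, pvChg vtc v))) (-mabs - ox) (mabs - ox)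
            minP maxP cn.toNat 0 0
          = (pyCWR variants cn.toNat).filter (fun combo =>
              decide (-mabs - ox ≤ (combo.map (pvChg vtc)).sum ∧
                      (combo.map (pvChg vtc)).sum ≤ mabs - ox)) := by
      intro minP maxP hmin hmax
      rw [pvMain variants (pvChg vtc) _ _ _ _ hmin hmax cn.toNat 0 0, List.drop_zero]
      congr 1
      funext l
      simp only [zero_add]
    have hne : variants ≠ [] → (variants.map (fun v => (v, pvChg vtc v))).isEmpty = false := by
      intro h; cases variants with
      | nil => exact absurd rfl h
      | cons a t => simp
    have hcharges : (variants.map (fun v => (v, pvChg vtc v))).map (·.2)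
        = variants.map (pvChg vtc) := by
      simp
    have hminb : ∀ v ∈ variants,
        (if (variants.map (fun v => (v, pvChg vtc v))).isEmpty then 0
         else (PySem.List.min? ((variants.map (fun v => (v, pvChg vtc v))).map (·.2))
                (fun x => x)).getD 0) ≤ pvChg vtc v := by
      intro v hv
      rw [if_neg (by simp [hne (List.ne_nil_of_mem hv)]), hcharges]
      cases hmn : PySem.List.min? (variants.map (pvChg vtc)) (fun x => x) with
      | none =>
        rw [PySem.List.min?_eq_none_iff, List.map_eq_nil_iff] at hmn
        exact absurd hv (by simp [hmn])
      | some mn =>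
        have hvm : pvChg vtc v ∈ variants.map (pvChg vtc) := List.mem_map_of_mem hv
        simpa using PySem.List.min?_isMin hmn (pvChg vtc v) hvm
    have hmaxb : ∀ v ∈ variants,
        pvChg vtc v ≤ (if (variants.map (fun v => (v, pvChg vtc v))).isEmpty then 0
         else (PySem.List.max? ((variants.map (fun v => (v, pvChg vtc v))).map (·.2))
                (fun x => x)).getD 0) := by
      intro v hv
      rw [if_neg (by simp [hne (List.ne_nil_of_mem hv)]), hcharges]
      cases hmn : PySem.List.max? (variants.map (pvChg vtc)) (fun x => x) with
      | none =>
        rw [PySem.List.max?_eq_none_iff, List.map_eq_nil_iff] at hmn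
        exact absurd hv (by simp [hmn])
      | some mn =>
        have hvm : pvChg vtc v ∈ variants.map (pvChg vtc) := List.mem_map_of_mem hv
        simpa using PySem.List.max?_isMax hmn (pvChg vtc v) hvm
    exact key _ _ hminb hmaxb
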